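-- pv_equiv track=rewrite | github.com/shuvo-dotcom/agentic-system | core/simple_task_manager.py | _identify_metric_simple
-- ===== SOURCE A (Python) =====
-- from typing import Any, Dict, List, Optional
--
-- def _identify_metric_simple(query: str) -> Dict[str, Any]:
--     """Simple metric identification without FormulaResolver."""
--     query_lower = query.lower()
--
--     if any(term in query_lower for term in ["lcoe", "levelized cost", "cost of energy"]):
--         return {
--             "metric_id": "lcoe",
--             "name": "Levelized Cost of Energy",
--             "formula": "(CAPEX + sum(OPEX_t / (1 + discount_rate)^t)) / sum(energy_output_t / (1 + discount_rate)^t)"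
--         }
--     elif any(term in query_lower for term in ["capacity factor", "cf", "utilization"]):
--         return {
--             "metric_id": "capacity_factor",
--             "name": "Capacity Factor",
--             "formula": "actual_energy_output / (nameplate_capacity * hours_in_period)"
--         }
--     elif any(term in query_lower for term in ["npv", "net present value"]):
--         return {
--             "metric_id": "npv",
--             "name": "Net Present Value",
--             "formula": "sum((cash_flow_t - investment_t) / (1 + discount_rate)^t)"
--         }
--     else:
--         return {
--             "metric_id": "general",
--             "name": "General Query",
--             "formula": None
--         }
-- ===== SOURCE B (Python) =====
-- from typing import Any, Dict, List, Optional
--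
-- # Flat keyword table: each term is paired with the priority rank of its metric.
-- _TERMS = [
--     ("lcoe", 0), ("levelized cost", 0), ("cost of energy", 0),
--     ("capacity factor", 1), ("cf", 1), ("utilization", 1),
--     ("npv", 2), ("net present value", 2),
-- ]
--
-- _RESULTS = [
--     {
--         "metric_id": "lcoe",
--         "name": "Levelized Cost of Energy",
--         "formula": "(CAPEX + sum(OPEX_t / (1 + discount_rate)^t)) / sum(energy_output_t / (1 + discount_rate)^t)"
--     },
--     {
--         "metric_id": "capacity_factor",
--         "name": "Capacity Factor",
--         "formula": "actual_energy_output / (nameplate_capacity * hours_in_period)"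
--     },
--     {
--         "metric_id": "npv",
--         "name": "Net Present Value",
--         "formula": "sum((cash_flow_t - investment_t) / (1 + discount_rate)^t)"
--     },
-- ]
--
-- _GENERAL = {"metric_id": "general", "name": "General Query", "formula": None}
--
-- def _identify_metric_simple(query: str) -> Dict[str, Any]:
--     """Simple metric identification: collect ranks of ALL matching terms, pick the best."""
--     query_lower = query.lower()
--     matched = [rank for term, rank in _TERMS if term in query_lower]
--     if not matched:
--         return _GENERAL
--     return _RESULTS[min(matched)]
-- ===== Notes on version B (the rewrite author's own statement) =====
-- stated objective: alternative
-- what changed: Instead of A's short-circuit if/elif over per-metric term groups, B does one full pass over a flat (term, priority-rank) list collecting ranks of all matching terms, then selects the result by min(ranks), defaulting to the general dict when nothing matched.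
import Mathlib
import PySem

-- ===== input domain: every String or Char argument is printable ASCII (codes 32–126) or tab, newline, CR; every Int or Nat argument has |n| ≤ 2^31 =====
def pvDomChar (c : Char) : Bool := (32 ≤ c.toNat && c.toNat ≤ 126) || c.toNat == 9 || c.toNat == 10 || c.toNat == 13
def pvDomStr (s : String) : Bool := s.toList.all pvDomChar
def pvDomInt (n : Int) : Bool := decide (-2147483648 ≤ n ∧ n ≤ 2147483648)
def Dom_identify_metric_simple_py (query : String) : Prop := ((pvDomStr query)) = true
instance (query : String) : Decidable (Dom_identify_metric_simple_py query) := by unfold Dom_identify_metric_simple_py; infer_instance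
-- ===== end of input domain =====

-- B replaces A's short-circuit if/elif chain by a full pass over a flat (term, rank) list
-- collecting ranks of all matching terms, then selecting the result by min(ranks).

-- ===== PORT A =====
def identify_metric_simple_py (query : String) : List (String × Option String) :=
  let query_lower := PySem.Str.lower query
  if ["lcoe", "levelized cost", "cost of energy"].any (fun term => PySem.Str.isIn term query_lower) then
    [("metric_id", some "lcoe"),
     ("name", some "Levelized Cost of Energy"),
     ("formula", some "(CAPEX + sum(OPEX_t / (1 + discount_rate)^t)) / sum(energy_output_t / (1 + discount_rate)^t)")]
  else if ["capacity factor", "cf", "utilization"].any (fun term => PySem.Str.isIn term query_lower) then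
    [("metric_id", some "capacity_factor"),
     ("name", some "Capacity Factor"),
     ("formula", some "actual_energy_output / (nameplate_capacity * hours_in_period)")]
  else if ["npv", "net present value"].any (fun term => PySem.Str.isIn term query_lower) then
    [("metric_id", some "npv"),
     ("name", some "Net Present Value"),
     ("formula", some "sum((cash_flow_t - investment_t) / (1 + discount_rate)^t)")]
  else
    [("metric_id", some "general"),
     ("name", some "General Query"),
     ("formula", none)]

-- ===== PORT B =====
def pvTerms : List (String × Nat) :=
  [("lcoe", 0), ("levelized cost", 0), ("cost of energy", 0),
   ("capacity factor", 1), ("cf", 1), ("utilization", 1),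
   ("npv", 2), ("net present value", 2)]

def pvResults : List (List (String × Option String)) :=
  [[("metric_id", some "lcoe"),
    ("name", some "Levelized Cost of Energy"),
    ("formula", some "(CAPEX + sum(OPEX_t / (1 + discount_rate)^t)) / sum(energy_output_t / (1 + discount_rate)^t)")],
   [("metric_id", some "capacity_factor"),
    ("name", some "Capacity Factor"),
    ("formula", some "actual_energy_output / (nameplate_capacity * hours_in_period)")],
   [("metric_id", some "npv"),
    ("name", some "Net Present Value"),
    ("formula", some "sum((cash_flow_t - investment_t) / (1 + discount_rate)^t)")]]

def pvGeneral : List (String × Option String) :=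
  [("metric_id", some "general"), ("name", some "General Query"), ("formula", none)]

def identify_metric_simple_py_alt (query : String) : List (String × Option String) :=
  let query_lower := PySem.Str.lower query
  let matched := (pvTerms.filter (fun p => PySem.Str.isIn p.1 query_lower)).map Prod.snd
  match matched.min? with
  | none => pvGeneral
  | some r => pvResults.getD r pvGeneral

-- ===== PRECONDITION & SPEC =====
def Spec_identify_metric_simple_py (query : String) (out : List (String × Option String)) : Prop := out = identify_metric_simple_py_alt query
instance (query : String) (out : List (String × Option String)) : Decidable (Spec_identify_metric_simple_py query out) := by unfold Spec_identify_metric_simple_py; infer_instance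

-- ===== CLAIM =====
def Claim_equal_identify_metric_simple_py : Prop := ∀ (query : String), Dom_identify_metric_simple_py query → Spec_identify_metric_simple_py query (identify_metric_simple_py query)

-- ===== LEMMAS AND PROOFS =====

-- characterisation of B's rank scan: min of the ranks of matching terms, as a priority cascade
theorem pvMin_char (P : String × Nat → Bool) :
    ((pvTerms.filter P).map Prod.snd).min? =
      (if P ("lcoe", 0) || (P ("levelized cost", 0) || (P ("cost of energy", 0) || false)) then some 0
       else if P ("capacity factor", 1) || (P ("cf", 1) || (P ("utilization", 1) || false)) then some 1
       else if P ("npv", 2) || (P ("net present value", 2) || false) then some 2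
       else none) := by
  simp only [pvTerms, List.filter_cons, List.filter_nil, Bool.or_false]
  cases h1 : P ("lcoe", 0) <;> cases h2 : P ("levelized cost", 0) <;>
  cases h3 : P ("cost of energy", 0) <;> cases h4 : P ("capacity factor", 1) <;>
  cases h5 : P ("cf", 1) <;> cases h6 : P ("utilization", 1) <;>
  cases h7 : P ("npv", 2) <;> cases h8 : P ("net present value", 2) <;>
    simp only [Bool.or_true, Bool.or_false] <;> rfl

-- ===== VERDICT =====
theorem identify_metric_simple_py_spec : Claim_equal_identify_metric_simple_py := by
  intro query _
  simp only [Spec_identify_metric_simple_py, identify_metric_simple_py,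
    identify_metric_simple_py_alt, List.any_cons, List.any_nil]
  rw [pvMin_char]
  split_ifs <;> rfl
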